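-- pv_equiv track=rewrite | github.com/Fondamenti18/fondamenti-di-programmazione | students/1815142/homework04/program03.py | conta_tag
-- ===== SOURCE A (Python) =====
-- def conta_tag(a, cont, selettore, stato):
--     if len(a)==0:
--         return cont
--     if len(a)>0:
--         if stato=='tag':
--             if a[0].find('<'+selettore)!=-1:
--                 return conta_tag(a[1:], cont+1, selettore,stato)
--         if stato!='tag':
--             if a[0].find(selettore.replace('.','').replace('@','').replace('[','').replace(']',''))!=-1:
--                 return conta_tag(a[1:], cont+1, selettore,stato)
--         return conta_tag(a[1:], cont, selettore,stato)
-- ===== SOURCE B (Python) =====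
-- def conta_tag(a, cont, selettore, stato):
--     if stato == 'tag':
--         needle = '<' + selettore
--     else:
--         needle = selettore.replace('.', '').replace('@', '').replace('[', '').replace(']', '')
--     c = cont
--     for s in a:
--         if needle in s:
--             c += 1
--     return c
-- ===== Notes on version B (the rewrite author's own statement) =====
-- stated objective: faster
-- what changed: Replaces the tail recursion that slices a[1:] and rebuilds the search needle on every call by a single for-loop with a counter and the needle (tag prefix or stripped selector) computed once, testing membership with 'in'.
import Mathlib
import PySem

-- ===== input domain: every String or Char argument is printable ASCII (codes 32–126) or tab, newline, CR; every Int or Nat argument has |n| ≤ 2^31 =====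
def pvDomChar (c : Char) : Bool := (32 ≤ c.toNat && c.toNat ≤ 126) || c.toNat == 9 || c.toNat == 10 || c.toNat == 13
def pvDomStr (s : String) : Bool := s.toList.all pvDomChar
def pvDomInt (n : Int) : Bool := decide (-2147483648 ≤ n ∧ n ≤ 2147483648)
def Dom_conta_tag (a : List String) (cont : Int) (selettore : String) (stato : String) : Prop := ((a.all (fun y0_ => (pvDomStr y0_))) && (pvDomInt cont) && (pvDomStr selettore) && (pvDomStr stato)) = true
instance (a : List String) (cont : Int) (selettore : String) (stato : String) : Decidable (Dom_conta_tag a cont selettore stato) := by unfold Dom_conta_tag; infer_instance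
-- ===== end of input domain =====

-- B replaces the recursion-with-slicing by a single loop with a needle computed once before it; return value only, no side effects.
-- ===== PORT A =====
def conta_tag (a : List String) (cont : Int) (selettore : String) (stato : String) : Int :=
  match a with
  | [] => cont
  | x :: rest =>
    if stato == "tag" ∧ PySem.Str.find x ("<" ++ selettore) ≠ -1 then
      conta_tag rest (cont + 1) selettore stato
    else if stato ≠ "tag" ∧ PySem.Str.find x (PySem.Str.replace (PySem.Str.replace (PySem.Str.replace (PySem.Str.replace selettore "." "") "@" "") "[" "") "]" "") ≠ -1 then
      conta_tag rest (cont + 1) selettore stato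
    else
      conta_tag rest cont selettore stato

-- ===== PORT B =====
-- the needle built once before B's loop
def pvNeedle (selettore stato : String) : String :=
  if stato == "tag" then "<" ++ selettore
  else PySem.Str.replace (PySem.Str.replace (PySem.Str.replace (PySem.Str.replace selettore "." "") "@" "") "[" "") "]" ""

def conta_tag_alt (a : List String) (cont : Int) (selettore : String) (stato : String) : Int :=
  a.foldl (fun c s => if PySem.Str.isIn (pvNeedle selettore stato) s then c + 1 else c) cont

-- ===== PRECONDITION & SPEC =====
def Spec_conta_tag (a : List String) (cont : Int) (selettore : String) (stato : String) (out : Int) : Prop := out = conta_tag_alt a cont selettore stato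
instance (a : List String) (cont : Int) (selettore : String) (stato : String) (out : Int) : Decidable (Spec_conta_tag a cont selettore stato out) := by unfold Spec_conta_tag; infer_instance

-- ===== CLAIM (what is proved, stated in full; the proofs are below) =====
def Claim_equal_conta_tag : Prop := ∀ (a : List String) (cont : Int) (selettore : String) (stato : String), Dom_conta_tag a cont selettore stato → Spec_conta_tag a cont selettore stato (conta_tag a cont selettore stato)

-- ===== LEMMAS AND PROOFS =====

-- Python 'sub in s' and 's.find(sub) != -1' agree.
theorem find_ne_iff_isIn (s needle : String) :
    (PySem.Str.find s needle ≠ -1) ↔ PySem.Str.isIn needle s = true := by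
  rw [PySem.Str.find_ne_neg_one_iff, PySem.Str.isIn_iff_infix]

theorem alt_cons (x : String) (rest : List String) (cont : Int) (selettore stato : String) :
    conta_tag_alt (x :: rest) cont selettore stato =
      conta_tag_alt rest (if PySem.Str.isIn (pvNeedle selettore stato) x then cont + 1 else cont)
        selettore stato := rfl

set_option maxHeartbeats 1000000 in
theorem conta_tag_eq_alt (a : List String) (cont : Int) (selettore stato : String) :
    conta_tag a cont selettore stato = conta_tag_alt a cont selettore stato := by
  induction a generalizing cont with
  | nil => rfl
  | cons x rest ih =>
    rw [alt_cons]
    have hmatch : (PySem.Str.isIn (pvNeedle selettore stato) x = true) ↔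
        ((stato == "tag") = true ∧ PySem.Str.find x ("<" ++ selettore) ≠ -1) ∨
        (stato ≠ "tag" ∧ PySem.Str.find x (PySem.Str.replace (PySem.Str.replace (PySem.Str.replace (PySem.Str.replace selettore "." "") "@" "") "[" "") "]" "") ≠ -1) := by
      by_cases hs : (stato == "tag") = true
      · have hs' : ¬ stato ≠ "tag" := by simpa using hs
        simp only [pvNeedle, hs, if_true]
        rw [← find_ne_iff_isIn]
        exact ⟨fun h => Or.inl ⟨trivial, h⟩, fun h => h.elim And.right (fun h2 => absurd h2.1 hs')⟩
      · have hb : (stato == "tag") = false := by simpa using hs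
        have hs' : stato ≠ "tag" := by simpa using hb
        simp only [pvNeedle, hb, Bool.false_eq_true, if_false]
        rw [← find_ne_iff_isIn]
        exact ⟨fun h => Or.inr ⟨hs', h⟩, fun h => h.elim (fun h1 => h1.1.elim) And.right⟩
    by_cases h1 : (stato == "tag") = true ∧ PySem.Str.find x ("<" ++ selettore) ≠ -1
    · rw [conta_tag, if_pos h1, if_pos (hmatch.mpr (Or.inl h1)), ih]
    · by_cases h2 : stato ≠ "tag" ∧ PySem.Str.find x (PySem.Str.replace (PySem.Str.replace (PySem.Str.replace (PySem.Str.replace selettore "." "") "@" "") "[" "") "]" "") ≠ -1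
      · rw [conta_tag, if_neg h1, if_pos h2, if_pos (hmatch.mpr (Or.inr h2)), ih]
      · rw [conta_tag, if_neg h1, if_neg h2,
          if_neg (fun h => (hmatch.mp h).elim h1 h2), ih]

-- ===== VERDICT =====
theorem conta_tag_spec : Claim_equal_conta_tag := by
  intro a cont selettore stato _
  unfold Spec_conta_tag
  exact conta_tag_eq_alt a cont selettore stato
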